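-- pv_equiv track=rewrite | github.com/jda808/mlostekk-live | midiRemoteScripts/_liveUtils/stuffToAnalyseASAP/Program.py | trunc_string
-- ===== SOURCE A (Python) =====
-- def trunc_string(display_string, length):
--     if (not display_string):
--         return (' ' * length)
--     if ((len(display_string.strip()) > length) and (display_string.endswith('dB') and (display_string.find('.') != -1))):
--         display_string = display_string[:-2]
--     if (len(display_string) > length):
--         for um in [' ',
--          'i',
--          'o',
--          'u',
--          'e',
--          'a']:
--             while ((len(display_string) > length) and (display_string.rfind(um, 1) != -1)):
--                 um_pos = display_string.rfind(um, 1)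
--                 display_string = (display_string[:um_pos] + display_string[(um_pos + 1):])
--
--     else:
--         display_string = display_string.ljust(length)
--
--     return display_string[0:length]
-- ===== SOURCE B (Python) =====
-- def trunc_string(display_string, length):
--     s = display_string
--     if not s:
--         return ' ' * length
--     if len(s.strip()) > length and s.endswith('dB') and '.' in s:
--         s = s[:-2]
--     if len(s) <= length:
--         return s.ljust(length)
--     # Remove, per class in order, the rightmost occurrences (never index 0) in
--     # ONE right-to-left pass per class instead of a rescan per removal.
--     head, tail = s[0], list(s[1:])
--     need = len(s) - length
--     for um in ' iouea':
--         if need == 0: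
--             break
--         k = min(need, tail.count(um))
--         need -= k
--         if k:
--             kept = []
--             for ch in reversed(tail):
--                 if k and ch == um:
--                     k -= 1
--                 else:
--                     kept.append(ch)
--             kept.reverse()
--             tail = kept
--     return (head + ''.join(tail))[0:length]
-- ===== Notes on version B (the rewrite author's own statement) =====
-- stated objective: faster
-- what changed: Instead of re-scanning the string with rfind and rebuilding it for every single removed character, B computes once how many characters must go and removes, for each class in order, the rightmost occurrences in a single counted right-to-left pass over the tail.
import Mathlib
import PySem

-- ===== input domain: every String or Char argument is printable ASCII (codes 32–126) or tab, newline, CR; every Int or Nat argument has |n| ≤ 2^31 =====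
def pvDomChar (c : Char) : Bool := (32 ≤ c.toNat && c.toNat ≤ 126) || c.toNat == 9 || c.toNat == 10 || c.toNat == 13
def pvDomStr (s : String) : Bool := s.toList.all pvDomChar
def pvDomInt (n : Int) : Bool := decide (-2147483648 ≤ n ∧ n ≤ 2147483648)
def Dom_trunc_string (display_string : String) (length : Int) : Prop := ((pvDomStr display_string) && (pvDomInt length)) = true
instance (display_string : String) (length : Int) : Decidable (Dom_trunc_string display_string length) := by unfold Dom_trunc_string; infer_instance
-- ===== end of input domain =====

-- B removes the needed rightmost space/vowel occurrences in one counted pass per class instead of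
-- A's rescan-and-rebuild per removed character; the return values are proved equal on all inputs.

-- ===== PORT A =====
-- The lemmas before `remLoop` characterise Python's s.rfind(c, 1) for a one-character needle;
-- remLoop's termination proof cites `remove_step_lt` (each removal shortens the string).

lemma singleton_prefix_iff (c : Char) (xs : List Char) : [c] <+: xs ↔ xs[0]? = some c := by
  cases xs with
  | nil => simp
  | cons x l => simp [List.cons_prefix_cons, eq_comm]

lemma singleton_isPrefixOf_drop (t : List Char) (c : Char) (i : Nat) :
    [c].isPrefixOf (t.drop i) = true ↔ t[i]? = some c := by
  rw [List.isPrefixOf_iff_prefix, singleton_prefix_iff, List.getElem?_drop, Nat.add_zero]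

lemma rfind_go_zero (t : List Char) (c : Char) :
    PySem.Chars.rfind.go t [c] 0 = if [c].isPrefixOf t then 0 else -1 := by
  rfl

lemma rfind_go_succ (t : List Char) (c : Char) (i : Nat) :
    PySem.Chars.rfind.go t [c] (i + 1) =
      if [c].isPrefixOf (t.drop (i + 1)) then ((i + 1 : Nat) : Int)
      else PySem.Chars.rfind.go t [c] i := by
  rfl

lemma rfind_go_neg (t : List Char) (c : Char) (i : Nat)
    (h : ∀ j, j ≤ i → t[j]? ≠ some c) : PySem.Chars.rfind.go t [c] i = -1 := by
  induction i with
  | zero =>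
      rw [rfind_go_zero, if_neg]
      rw [show t = t.drop 0 from rfl, singleton_isPrefixOf_drop]
      exact h 0 (le_refl 0)
  | succ j ih =>
      rw [rfind_go_succ, if_neg]
      · exact ih (fun j' hj' => h j' (Nat.le_succ_of_le hj'))
      · rw [singleton_isPrefixOf_drop]; exact h (j + 1) (le_refl _)

lemma rfind_go_pos (t : List Char) (c : Char) (i j : Nat)
    (hji : j ≤ i) (hj : t[j]? = some c)
    (hmax : ∀ j', j < j' → j' ≤ i → t[j']? ≠ some c) :
    PySem.Chars.rfind.go t [c] i = (j : Int) := by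
  induction i with
  | zero =>
      have hj0 : j = 0 := Nat.le_zero.mp hji
      subst hj0
      rw [rfind_go_zero,
        if_pos (by rw [show t = t.drop 0 from rfl, singleton_isPrefixOf_drop]; exact hj)]
      norm_num
  | succ i ih =>
      rw [rfind_go_succ]
      by_cases hcase : j = i + 1
      · subst hcase
        rw [if_pos (by rw [singleton_isPrefixOf_drop]; exact hj)]
      · rw [if_neg (by rw [singleton_isPrefixOf_drop]; exact hmax (i + 1) (by omega) (le_refl _))]
        exact ih (by omega) (fun j' h1 h2 => hmax j' h1 (Nat.le_succ_of_le h2))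

lemma rfind_singleton_split (A B : List Char) (c : Char) (hB : c ∉ B) :
    PySem.Chars.rfind (A ++ c :: B) [c] = (A.length : Int) := by
  unfold PySem.Chars.rfind
  apply rfind_go_pos
  · simp
  · simp
  · intro j' h1 h2 hget
    rw [List.getElem?_append_right (by omega : A.length ≤ j')] at hget
    rw [show j' - A.length = (j' - A.length - 1) + 1 by omega, List.getElem?_cons_succ] at hget
    exact hB (List.mem_of_getElem? hget)

lemma rfind_singleton_not_mem (t : List Char) (c : Char) (hc : c ∉ t) :
    PySem.Chars.rfind t [c] = -1 := by
  unfold PySem.Chars.rfind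
  exact rfind_go_neg t c t.length (fun j _ hget => hc (List.mem_of_getElem? hget))

lemma exists_last_split {c : Char} {t : List Char} (h : c ∈ t) :
    ∃ A B, t = A ++ c :: B ∧ c ∉ B := by
  induction t with
  | nil => cases h
  | cons x xs ih =>
      by_cases hx : c ∈ xs
      · obtain ⟨A, B, rfl, hB⟩ := ih hx
        exact ⟨x :: A, B, rfl, hB⟩
      · have hcx : c = x := by
          rcases List.mem_cons.mp h with h | h
          · exact h
          · exact absurd h hx
        exact ⟨[], xs, by simp [hcx], hx⟩

lemma rfindFrom_cons (h : Char) (t : List Char) (c : Char) :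
    PySem.Chars.rfindFrom (h :: t) [c] 1 none =
      (if PySem.Chars.rfind t [c] = -1 then -1 else 1 + PySem.Chars.rfind t [c]) := by
  simp only [PySem.Chars.rfindFrom]
  norm_num

lemma rfindFrom_nil (c : Char) : PySem.Chars.rfindFrom [] [c] 1 none = -1 := by
  rfl

lemma rfindFrom_cons_neg (h : Char) (t : List Char) (c : Char) (hc : c ∉ t) :
    PySem.Chars.rfindFrom (h :: t) [c] 1 none = -1 := by
  rw [rfindFrom_cons, rfind_singleton_not_mem t c hc]
  simp

lemma rfindFrom_split (h : Char) (A B : List Char) (c : Char) (hB : c ∉ B) :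
    PySem.Chars.rfindFrom (h :: (A ++ c :: B)) [c] 1 none = (A.length : Int) + 1 := by
  rw [rfindFrom_cons, rfind_singleton_split A B c hB, if_neg (by omega)]
  omega

lemma remove_step_eq (h : Char) (A B : List Char) (c : Char) (hB : c ∉ B) :
    PySem.List.slice (h :: (A ++ c :: B)) none
        (some (PySem.Chars.rfindFrom (h :: (A ++ c :: B)) [c] 1 none)) ++
      PySem.List.slice (h :: (A ++ c :: B))
        (some (PySem.Chars.rfindFrom (h :: (A ++ c :: B)) [c] 1 none + 1)) none
      = h :: (A ++ B) := by
  rw [rfindFrom_split h A B c hB]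
  rw [show (A.length : Int) + 1 = ((A.length + 1 : Nat) : Int) by push_cast; ring]
  rw [show ((A.length + 1 : Nat) : Int) + 1 = ((A.length + 2 : Nat) : Int) by push_cast; ring]
  rw [PySem.List.slice_to_natCast, PySem.List.slice_from_natCast]
  rw [show h :: (A ++ c :: B) = (h :: A) ++ (c :: B) by simp]
  rw [List.take_left' (by simp)]
  rw [show (h :: A) ++ (c :: B) = ((h :: A) ++ [c]) ++ B by simp]
  rw [List.drop_left' (by simp)]
  simp

lemma remove_step_lt (l : List Char) (c : Char)
    (hp : PySem.Chars.rfindFrom l [c] 1 none ≠ -1) :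
    (PySem.List.slice l none (some (PySem.Chars.rfindFrom l [c] 1 none)) ++
      PySem.List.slice l (some (PySem.Chars.rfindFrom l [c] 1 none + 1)) none).length < l.length := by
  cases l with
  | nil => exact absurd (rfindFrom_nil c) hp
  | cons h t =>
      by_cases hc : c ∈ t
      · obtain ⟨A, B, rfl, hB⟩ := exists_last_split hc
        rw [remove_step_eq h A B c hB]
        simp
      · exact absurd (rfindFrom_cons_neg h t c hc) hp

-- A's while loop: repeatedly remove the rightmost occurrence (index ≥ 1) while too long
def remLoop (um : Char) (target : Int) (l : List Char) : List Char :=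
  if (l.length : Int) > target then
    if _hp : PySem.Chars.rfindFrom l [um] 1 none ≠ -1 then
      remLoop um target
        (PySem.List.slice l none (some (PySem.Chars.rfindFrom l [um] 1 none)) ++
          PySem.List.slice l (some (PySem.Chars.rfindFrom l [um] 1 none + 1)) none)
    else l
  else l
termination_by l.length
decreasing_by exact remove_step_lt l um _hp

def trunc_string (display_string : String) (length : Int) : String :=
  let ds := display_string.toList
  if ds = [] then
    String.ofList (PySem.List.pyRepeat [' '] length)      -- ' ' * length
  else
    let ds1 :=
      if ((PySem.Chars.strip ds).length : Int) > length ∧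
          PySem.Chars.endswith ds ['d', 'B'] = true ∧ PySem.Chars.find ds ['.'] ≠ -1 then
        PySem.List.slice ds none (some (-2))              -- display_string[:-2]
      else ds
    let ds2 :=
      if (ds1.length : Int) > length then
        [' ', 'i', 'o', 'u', 'e', 'a'].foldl (fun l um => remLoop um length l) ds1
      else
        ds1 ++ List.replicate (length.toNat - ds1.length) ' '   -- .ljust(length), ported by hand (exact: pad with spaces to width `length`, no-op if narrower)
    String.ofList (PySem.List.slice ds2 none (some length))     -- display_string[0:length]

-- ===== PORT B =====
-- one counted right-to-left pass: drop the last k occurrences of um, keep everything else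
def bRemove (um : Char) (k : Nat) (tail : List Char) : List Char :=
  ((tail.reverse.foldl
      (fun (st : Nat × List Char) ch =>
        if st.1 ≠ 0 ∧ ch = um then (st.1 - 1, st.2) else (st.1, st.2 ++ [ch]))
      (k, [])).2).reverse

def bLoop : List Char → Nat → List Char → List Char
  | [], _, tail => tail
  | um :: rest, need, tail =>
    if need = 0 then tail
    else
      let k := min need (PySem.List.count tail um)
      if k ≠ 0 then bLoop rest (need - k) (bRemove um k tail)
      else bLoop rest (need - k) tail

def trunc_string_alt (display_string : String) (length : Int) : String :=
  let s0 := display_string.toList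
  if s0 = [] then
    String.ofList (PySem.List.pyRepeat [' '] length)      -- ' ' * length
  else
    let s :=
      if ((PySem.Chars.strip s0).length : Int) > length ∧
          PySem.Chars.endswith s0 ['d', 'B'] = true ∧ PySem.Chars.isIn ['.'] s0 = true then
        PySem.List.slice s0 none (some (-2))              -- s[:-2]
      else s0
    if (s.length : Int) ≤ length then
      String.ofList (s ++ List.replicate (length.toNat - s.length) ' ')   -- s.ljust(length), ported by hand (exact)
    else
      let head := PySem.List.pyGetD s 0 ' '               -- s[0]; s ≠ [] holds here (lemma trimmed_ne_nil below)
      let tail := PySem.List.slice s (some 1) none        -- list(s[1:])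
      let need := ((s.length : Int) - length).toNat
      String.ofList (PySem.List.slice (head :: bLoop [' ', 'i', 'o', 'u', 'e', 'a'] need tail) none (some length))

-- ===== PRECONDITION & SPEC =====
def Spec_trunc_string (display_string : String) (length : Int) (out : String) : Prop := out = trunc_string_alt display_string length
instance (display_string : String) (length : Int) (out : String) : Decidable (Spec_trunc_string display_string length out) := by unfold Spec_trunc_string; infer_instance

-- ===== CLAIM (what is proved, stated in full; the proofs are below) =====
def Claim_equal_trunc_string : Prop := ∀ (display_string : String) (length : Int), Dom_trunc_string display_string length → Spec_trunc_string display_string length (trunc_string display_string length)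

-- ===== LEMMAS AND PROOFS =====

-- proof-side denotation: remove the first k occurrences of c (left to right)
def eraseCount (c : Char) : Nat → List Char → List Char
  | _, [] => []
  | 0, l => l
  | k + 1, x :: xs => if x = c then eraseCount c k xs else x :: eraseCount c (k + 1) xs

-- remove the last k occurrences of c
def eraseRight (c : Char) (k : Nat) (t : List Char) : List Char := (eraseCount c k t.reverse).reverse

-- denotation shared by A's per-class while loops and B's per-class passes
def bDen : List Char → Nat → List Char → List Char
  | [], _, t => t
  | u :: us, need, t =>
    if need = 0 then t
    else bDen us (need - min need (t.count u)) (eraseRight u (min need (t.count u)) t)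

lemma eraseCount_zero (c : Char) (l : List Char) : eraseCount c 0 l = l := by
  cases l <;> rfl

lemma eraseRight_zero (c : Char) (t : List Char) : eraseRight c 0 t = t := by
  simp [eraseRight, eraseCount_zero]

lemma eraseCount_append_not_mem (c : Char) (k : Nat) (X Y : List Char) (hc : c ∉ X) :
    eraseCount c k (X ++ Y) = X ++ eraseCount c k Y := by
  induction X with
  | nil => rfl
  | cons x xs ih =>
      have hx : ¬ (x = c) := by rintro rfl; exact hc List.mem_cons_self
      cases k with
      | zero => simp [eraseCount_zero]
      | succ k =>
          simp only [List.cons_append, eraseCount, if_neg hx]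
          rw [ih (fun hm => hc (List.mem_cons_of_mem _ hm))]

lemma eraseCount_comp (c : Char) (m : Nat) (r : List Char) :
    eraseCount c m (eraseCount c 1 r) = eraseCount c (m + 1) r := by
  induction r generalizing m with
  | nil => simp [eraseCount]
  | cons x xs ih =>
      by_cases hx : x = c
      · subst hx
        simp [eraseCount, eraseCount_zero]
      · cases m with
        | zero => simp [eraseCount_zero]
        | succ m => simp [eraseCount, hx, ih]

lemma length_eraseCount (c : Char) (k : Nat) (r : List Char) :
    (eraseCount c k r).length = r.length - min k (r.count c) := by
  induction r generalizing k with
  | nil => simp [eraseCount]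
  | cons x xs ih =>
      cases k with
      | zero => simp [eraseCount_zero]
      | succ k =>
          by_cases hx : x = c
          · subst hx
            have hc : List.count x (x :: xs) = xs.count x + 1 := by simp
            have hle := List.count_le_length (l := xs) (a := x)
            simp [eraseCount, ih, hc]
          · have hc : List.count c (x :: xs) = xs.count c := by simp [hx]
            have hle := List.count_le_length (l := xs) (a := c)
            simp [eraseCount, hx, ih, hc]
            omega

lemma eraseRight_one_split (c : Char) (A B : List Char) (hB : c ∉ B) :
    eraseRight c 1 (A ++ c :: B) = A ++ B := by
  have hBr : c ∉ B.reverse := by simpa using hB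
  simp only [eraseRight, List.reverse_append, List.reverse_cons]
  rw [show B.reverse ++ [c] ++ A.reverse = B.reverse ++ (c :: A.reverse) by simp]
  rw [eraseCount_append_not_mem c 1 B.reverse _ hBr]
  rw [show eraseCount c 1 (c :: A.reverse) = eraseCount c 0 A.reverse by simp [eraseCount]]
  simp [eraseCount_zero]

lemma eraseRight_comp (c : Char) (m : Nat) (t : List Char) :
    eraseRight c m (eraseRight c 1 t) = eraseRight c (m + 1) t := by
  simp [eraseRight, eraseCount_comp]

lemma length_eraseRight (c : Char) (k : Nat) (t : List Char) :
    (eraseRight c k t).length = t.length - min k (t.count c) := by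
  simp [eraseRight, length_eraseCount]

lemma remLoop_not_mem (c : Char) (target : Int) (h : Char) (t : List Char) (hc : c ∉ t) :
    remLoop c target (h :: t) = h :: t := by
  rw [remLoop]
  by_cases hgt : (((h :: t).length : Int) > target)
  · rw [if_pos hgt, dif_neg (by simp [rfindFrom_cons_neg h t c hc])]
  · rw [if_neg hgt]

lemma remLoop_eq (c : Char) (target : Int) (n : Nat) :
    ∀ (h : Char) (t : List Char), t.length ≤ n →
      remLoop c target (h :: t) =
        h :: eraseRight c (min (t.count c) ((1 + (t.length : Int)) - target).toNat) t := by
  induction n with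
  | zero =>
      intro h t hle
      have ht : t = [] := List.eq_nil_of_length_eq_zero (Nat.le_zero.mp hle)
      subst ht
      rw [remLoop_not_mem c target h [] (by simp)]
      simp [eraseRight_zero]
  | succ m ih =>
      intro h t hle
      by_cases hgt : (((h :: t).length : Int) > target)
      · by_cases hc : c ∈ t
        · obtain ⟨A, B, rfl, hB⟩ := exists_last_split hc
          rw [remLoop, if_pos hgt,
            dif_pos (by rw [rfindFrom_split h A B c hB]; omega),
            remove_step_eq h A B c hB,
            ih h (A ++ B) (by simp at hle ⊢; omega)]
          have hcnt : (A ++ c :: B).count c = (A ++ B).count c + 1 := by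
            simp [List.count_append, List.count_eq_zero.mpr hB]
          have hlen : (A ++ c :: B).length = (A ++ B).length + 1 := by simp; omega
          have hK : min ((A ++ B).count c) ((1 + ((A ++ B).length : Int)) - target).toNat + 1 =
              min ((A ++ c :: B).count c) ((1 + ((A ++ c :: B).length : Int)) - target).toNat := by
            have hgt' : (1 + ((A ++ c :: B).length : Int)) > target := by
              simp at hgt ⊢
              omega
            rw [hcnt, hlen]
            push_cast
            omega
          rw [← hK, ← eraseRight_comp, eraseRight_one_split c A B hB]
        · rw [remLoop_not_mem c target h t hc]
          simp [List.count_eq_zero.mpr hc, eraseRight_zero]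
      · rw [remLoop, if_neg hgt]
        have h0 : ((1 + (t.length : Int)) - target).toNat = 0 := by
          simp at hgt
          omega
        simp [h0, eraseRight_zero]

lemma bDen_zero (cs : List Char) (t : List Char) : bDen cs 0 t = t := by
  cases cs <;> simp [bDen]

lemma foldl_remLoop (classes : List Char) (target : Int) :
    ∀ (h : Char) (t : List Char),
      classes.foldl (fun l um => remLoop um target l) (h :: t)
        = h :: bDen classes ((1 + (t.length : Int)) - target).toNat t := by
  induction classes with
  | nil => intro h t; simp [bDen]
  | cons u us ih =>
      intro h t
      rw [List.foldl_cons, remLoop_eq u target t.length h t (le_refl _)]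
      by_cases h0 : ((1 + (t.length : Int)) - target).toNat = 0
      · rw [h0]
        simp only [Nat.min_zero, eraseRight_zero]
        rw [ih h t, h0, bDen_zero]
        simp [bDen]
      · rw [ih h (eraseRight u (min (t.count u) ((1 + (t.length : Int)) - target).toNat) t)]
        have hcl := List.count_le_length (l := t) (a := u)
        have hlen : (eraseRight u (min (t.count u) ((1 + (t.length : Int)) - target).toNat) t).length
            = t.length - min (t.count u) ((1 + (t.length : Int)) - target).toNat := by
          rw [length_eraseRight]
          omega
        have hneed : ((1 + ((eraseRight u (min (t.count u) ((1 + (t.length : Int)) - target).toNat) t).length : Int)) - target).toNat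
            = ((1 + (t.length : Int)) - target).toNat - min (t.count u) ((1 + (t.length : Int)) - target).toNat := by
          rw [hlen]
          have : min (t.count u) ((1 + (t.length : Int)) - target).toNat ≤ t.length := by omega
          push_cast [this]
          omega
        rw [hneed]
        simp only [bDen, if_neg h0]
        rw [Nat.min_comm]

lemma bRemove_aux (c : Char) (r : List Char) :
    ∀ (k : Nat) (acc : List Char),
      (r.foldl
        (fun (st : Nat × List Char) ch =>
          if st.1 ≠ 0 ∧ ch = c then (st.1 - 1, st.2) else (st.1, st.2 ++ [ch]))
        (k, acc)).2 = acc ++ eraseCount c k r := by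
  induction r with
  | nil => intro k acc; simp [eraseCount]
  | cons x xs ih =>
      intro k acc
      rw [List.foldl_cons]
      by_cases hx : x = c
      · subst hx
        cases k with
        | zero =>
            rw [if_neg (by simp)]
            rw [ih 0 (acc ++ [x])]
            simp [eraseCount_zero]
        | succ k =>
            rw [if_pos (by simp)]
            rw [ih (k + 1 - 1) acc]
            simp [eraseCount]
      · rw [if_neg (by simp [hx])]
        rw [ih k (acc ++ [x])]
        cases k with
        | zero => simp [eraseCount_zero]
        | succ k => simp [eraseCount, hx]

lemma bRemove_eq (c : Char) (k : Nat) (t : List Char) : bRemove c k t = eraseRight c k t := by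
  rw [bRemove, eraseRight, bRemove_aux c t.reverse k []]
  simp

lemma bLoop_eq_bDen (cs : List Char) :
    ∀ (need : Nat) (t : List Char), bLoop cs need t = bDen cs need t := by
  induction cs with
  | nil => intro need t; rfl
  | cons u us ih =>
      intro need t
      by_cases h0 : need = 0
      · simp [bLoop, bDen, h0]
      · simp only [bLoop, bDen, if_neg h0, PySem.List.count_eq]
        by_cases hk : min need (t.count u) = 0
        · rw [hk]
          simp [eraseRight_zero, ih]
        · rw [if_pos hk, bRemove_eq, ih]

lemma trimmed_ne_nil (ds : List Char) (hds : ds ≠ [])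
    (hend : PySem.Chars.endswith ds ['d', 'B'] = true)
    (hdot : PySem.Chars.find ds ['.'] ≠ -1) :
    PySem.List.slice ds none (some (-2)) ≠ [] := by
  rw [PySem.List.slice_to_neg_ofNat ds 2 (by norm_num)]
  obtain ⟨pre, rfl⟩ : ∃ pre, ds = pre ++ ['d', 'B'] := by
    obtain ⟨pre, hp⟩ := (PySem.Chars.endswith_iff ds ['d', 'B']).mp hend
    exact ⟨pre, hp.symm⟩
  have hinf : ['.'] <:+: (pre ++ ['d', 'B']) := (PySem.Chars.find_ne_neg_one_iff _ _).mp hdot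
  have hmem : '.' ∈ pre ++ ['d', 'B'] := hinf.subset (by simp)
  have hdotpre : '.' ∈ pre := by simpa using hmem
  have hpre : pre ≠ [] := by rintro rfl; simp at hdotpre
  rw [show (pre ++ ['d', 'B']).length - 2 = pre.length by simp]
  rw [List.take_left' rfl]
  exact hpre


lemma main_branch (s : List Char) (target : Int) (hs : s ≠ []) :
    String.ofList (PySem.List.slice
        (if (s.length : Int) > target then
          [' ', 'i', 'o', 'u', 'e', 'a'].foldl (fun l um => remLoop um target l) s
        else s ++ List.replicate (target.toNat - s.length) ' ') none (some target))
      =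
      (if (s.length : Int) ≤ target then
        String.ofList (s ++ List.replicate (target.toNat - s.length) ' ')
      else
        String.ofList (PySem.List.slice
          (PySem.List.pyGetD s 0 ' ' ::
            bLoop [' ', 'i', 'o', 'u', 'e', 'a'] (((s.length : Int) - target).toNat)
              (PySem.List.slice s (some 1) none)) none (some target))) := by
  by_cases hle : (s.length : Int) ≤ target
  · rw [if_neg (by omega), if_pos hle]
    congr 1
    have h0 : (0 : Int) ≤ target := by omega
    rw [PySem.List.slice_to _ h0]
    apply List.take_of_length_le
    simp
    omega
  · rw [if_pos (by omega), if_neg hle]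
    cases s with
    | nil => exact absurd rfl hs
    | cons h t =>
        rw [foldl_remLoop, PySem.List.pyGetD_zero_cons, PySem.List.slice_from_one,
          bLoop_eq_bDen]
        have harg : (((h :: t).length : Int) - target).toNat
            = ((1 + (t.length : Int)) - target).toNat := by
          simp
          omega
        rw [harg]
        rfl

-- ===== VERDICT (by name: the statement is the Claim_ definition above) =====
theorem trunc_string_spec : Claim_equal_trunc_string := by
  unfold Claim_equal_trunc_string Spec_trunc_string
  intro dsS target _
  simp only [trunc_string, trunc_string_alt]
  by_cases hnil : dsS.toList = []
  · rw [if_pos hnil, if_pos hnil]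
  · rw [if_neg hnil, if_neg hnil]
    have hiff : (((PySem.Chars.strip dsS.toList).length : Int) > target ∧
          PySem.Chars.endswith dsS.toList ['d', 'B'] = true ∧
          PySem.Chars.find dsS.toList ['.'] ≠ -1) ↔
        (((PySem.Chars.strip dsS.toList).length : Int) > target ∧
          PySem.Chars.endswith dsS.toList ['d', 'B'] = true ∧
          PySem.Chars.isIn ['.'] dsS.toList = true) := by
      rw [PySem.Chars.find_ne_neg_one_iff, PySem.Chars.isIn_iff_infix]
    by_cases hC : ((PySem.Chars.strip dsS.toList).length : Int) > target ∧
        PySem.Chars.endswith dsS.toList ['d', 'B'] = true ∧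
        PySem.Chars.find dsS.toList ['.'] ≠ -1
    · rw [if_pos hC, if_pos (hiff.mp hC)]
      exact main_branch (PySem.List.slice dsS.toList none (some (-2))) target
        (trimmed_ne_nil dsS.toList hnil hC.2.1 hC.2.2)
    · rw [if_neg hC, if_neg (fun hx => hC (hiff.mpr hx))]
      exact main_branch dsS.toList target hnil
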